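-- pv_equiv track=rewrite | github.com/zkstewart/variantopia | modules/parsing.py | get_chunking_points
-- ===== SOURCE A (Python) =====
-- import gzip, codecs, math
--
-- def get_chunking_points(numberToChunk, chunks, isNumOfChunks=True):
--     '''
--     This is a general purpose function to take in a number of "things"
--     that you want to chunk, and find out how to chunk them evenly.
--
--     The resulting list should be interpreted as the 0-based indices where
--     a new chunk should form. You should check for this index at the start
--     of a loop, and form a new file if your index == the value in this list.
--
--     Also, this uses "allocated chunking" such that it will try to keep
--     the number of things per chunk approximately equal. Even if you specify
--     X number of things per chunk, it might be more optimal to have X-1 in each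
--     chunk so as to make sure the last chunk doesn't contain a single thing.
--     This might not be what you want, but usually, allocated chunking leads to
--     more optimal code (e.g., a major use of this function could be for
--     parallel processing of the chunks).
--
--     Params:
--         numberToChunk -- an integer value, possibly derived from a list length as example.
--         chunks -- an integer value for the desired number of chunks OR the number of
--                   sequences to contain within each chunk, determined by
--         isNumOfChunks -- a boolean indicating whether you want the number to be the number
--                          of chunks (True), or the number of sequences within each chunk (False)
--     '''
--     assert isinstance(numberToChunk, int)
--     assert isinstance(chunks, int)
--     if numberToChunk < chunks:
--         raise Exception(f"Chunking only valid if chunkSize <= chunks i.e., {chunks} <= {numberToChunk}")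
--
--     # Derive how many chunks we want to split the file into
--     if isNumOfChunks:
--         numChunks = chunks
--     else:
--         numChunks = math.ceil(numberToChunk / chunks)
--
--     rawNum = numberToChunk / numChunks # This line is more relevant in the multithreading code I took this from, but it's okay to just leave it.
--     numRoundedUp = round((rawNum % 1) * numChunks, 0) # By taking the decimal place and multiplying it by the num of chunks, we can figure out how many chunks need to be rounded up
--
--     # Store positions at which to start a new chunk
--     chunkPoints = []
--     ongoingCount = 0
--     for i in range(numChunks):
--
--         # Determine where chunks begin in 0-based indexing
--         if i < numRoundedUp: # decide if the number of sequences in this chunk should be rounded up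
--             point = math.ceil(rawNum) + ongoingCount # Round up the rawNum, and also add our ongoingCount which corresponds to the number of things already put into a chunk
--
--             # Prevent chunking beyond the last index where a chunk should start
--             if point >= numberToChunk: # Without this check, if we have more chunks than things to chunk, we can end up with "extra" numbers in the list (e.g., [1, 2, 3, 4, 5, 6, 6, 6, 6, 6]).
--                 break  # This doesn't actually affect program function, but for aesthetic reasons and for clarity of how this function works, I prevent this from occurring.
--
--             chunkPoints.append(point)
--             ongoingCount += math.ceil(rawNum)
--         else:
--             point = math.floor(rawNum) + ongoingCount # Round down the rawNum since we've already accounted for any extra uneven numbers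
--
--             if point >= numberToChunk:
--                 break
--
--             chunkPoints.append(point)
--             ongoingCount += math.floor(rawNum)
--
--     return chunkPoints
-- ===== SOURCE B (Python) =====
-- def get_chunking_points(numberToChunk, chunks, isNumOfChunks=True):
--     assert isinstance(numberToChunk, int)
--     assert isinstance(chunks, int)
--     if numberToChunk < chunks:
--         raise Exception(f"Chunking only valid if chunkSize <= chunks i.e., {chunks} <= {numberToChunk}")
--
--     # number of chunks; -(-a // b) is integer ceiling division
--     numChunks = chunks if isNumOfChunks else -(-numberToChunk // chunks)
--
--     # Closed form: the j-th chunk boundary (1-based j) is j*q + min(j, k), where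
--     # q = numberToChunk // numChunks and k = numberToChunk % numChunks, because the
--     # first k chunks hold q+1 things and the rest hold q. Keep only boundaries that
--     # fall before numberToChunk.
--     q, k = divmod(numberToChunk, numChunks)
--     return [j * q + min(j, k) for j in range(1, numChunks + 1)
--             if j * q + min(j, k) < numberToChunk]
-- ===== Notes on version B (the rewrite author's own statement) =====
-- stated objective: simpler
-- what changed: Replaces A's stateful loop (running ongoingCount, branch on rounded-up chunks, break) and its float arithmetic by a closed-form formula: the j-th boundary is j*q + min(j, k) with q, k = divmod(numberToChunk, numChunks), and a comprehension keeps the boundaries below numberToChunk.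
import Mathlib
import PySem

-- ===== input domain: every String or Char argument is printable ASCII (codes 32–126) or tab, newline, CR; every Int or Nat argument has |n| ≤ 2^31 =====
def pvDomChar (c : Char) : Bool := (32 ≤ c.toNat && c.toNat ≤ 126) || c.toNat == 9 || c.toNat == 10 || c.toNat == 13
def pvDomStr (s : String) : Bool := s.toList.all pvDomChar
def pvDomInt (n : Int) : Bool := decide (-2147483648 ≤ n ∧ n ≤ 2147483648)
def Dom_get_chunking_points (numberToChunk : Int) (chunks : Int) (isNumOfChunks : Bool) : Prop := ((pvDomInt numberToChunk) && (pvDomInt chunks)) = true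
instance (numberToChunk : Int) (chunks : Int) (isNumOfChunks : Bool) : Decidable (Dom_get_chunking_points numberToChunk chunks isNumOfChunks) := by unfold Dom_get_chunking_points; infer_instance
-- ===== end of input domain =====

-- B replaces A's stateful break-loop (running ongoingCount accumulator) by a closed-form formula
-- for each boundary (j*q + min(j,k)) filtered below numberToChunk (simpler, same cost); A's float
-- arithmetic is modelled exactly by integer floor/ceil division and mod, exact on the |n| ≤ 2^31 domain.


-- ===== PORT A =====
-- the 'for i in range(numChunks)' loop with its break and running ongoingCount
def pvChunkLoopA (numberToChunk rawCeil rawFloor numRoundedUp : Int) :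
    List Int → List Int → Int → List Int
  | [], chunkPoints, _ => chunkPoints
  | i :: rest, chunkPoints, ongoingCount =>
    if i < numRoundedUp then
      let point := rawCeil + ongoingCount
      if numberToChunk ≤ point then chunkPoints
      else pvChunkLoopA numberToChunk rawCeil rawFloor numRoundedUp rest
            (chunkPoints ++ [point]) (ongoingCount + rawCeil)
    else
      let point := rawFloor + ongoingCount
      if numberToChunk ≤ point then chunkPoints
      else pvChunkLoopA numberToChunk rawCeil rawFloor numRoundedUp rest
            (chunkPoints ++ [point]) (ongoingCount + rawFloor)

-- A's float expressions ported as the integer values they compute (exact for |n| ≤ 2^31, i.e. on Dom):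
--   math.ceil(a/b) = -((-a)//b), math.floor(rawNum) = n//m, round((rawNum % 1)*numChunks, 0) = n % m.
def get_chunking_points (numberToChunk : Int) (chunks : Int) (isNumOfChunks : Bool) : List Int :=
  let numChunks := if isNumOfChunks then chunks
                   else -(PySem.Int.floordiv (-numberToChunk) chunks)
  let rawCeil := -(PySem.Int.floordiv (-numberToChunk) numChunks)   -- math.ceil(rawNum)
  let rawFloor := PySem.Int.floordiv numberToChunk numChunks        -- math.floor(rawNum)
  let numRoundedUp := PySem.Int.mod numberToChunk numChunks         -- round((rawNum % 1) * numChunks, 0)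
  pvChunkLoopA numberToChunk rawCeil rawFloor numRoundedUp
    (PySem.List.pyRange 0 numChunks 1) [] 0

-- ===== PORT B =====
-- B: closed form — the j-th boundary (1-based) is j*q + min(j,k) with q,k = divmod(n, numChunks);
-- the comprehension keeps exactly the boundaries below numberToChunk (filter then map).
def get_chunking_points_alt (numberToChunk : Int) (chunks : Int) (isNumOfChunks : Bool) : List Int :=
  let numChunks := if isNumOfChunks then chunks
                   else -(PySem.Int.floordiv (-numberToChunk) chunks)
  let q := PySem.Int.floordiv numberToChunk numChunks
  let k := PySem.Int.mod numberToChunk numChunks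
  ((PySem.List.pyRange 1 (numChunks + 1) 1).filter
      (fun j => decide (j * q + min j k < numberToChunk))).map
    (fun j => j * q + min j k)

-- ===== PRECONDITION & SPEC =====
-- Pre_ excludes exactly the inputs where A raises: numberToChunk < chunks (explicit Exception) and
-- numChunks = 0 (ZeroDivisionError in 'numberToChunk / numChunks' resp. 'numberToChunk / chunks').
def Pre_get_chunking_points (numberToChunk : Int) (chunks : Int) (isNumOfChunks : Bool) : Prop :=
  chunks ≤ numberToChunk ∧
  (if isNumOfChunks then chunks else -(PySem.Int.floordiv (-numberToChunk) chunks)) ≠ 0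

instance (numberToChunk : Int) (chunks : Int) (isNumOfChunks : Bool) : Decidable (Pre_get_chunking_points numberToChunk chunks isNumOfChunks) := by unfold Pre_get_chunking_points; infer_instance

def pvWitness_get_chunking_points : Int × Int × Bool := (10, 3, true)

def Spec_get_chunking_points (numberToChunk : Int) (chunks : Int) (isNumOfChunks : Bool) (out : List Int) : Prop := out = get_chunking_points_alt numberToChunk chunks isNumOfChunks
instance (numberToChunk : Int) (chunks : Int) (isNumOfChunks : Bool) (out : List Int) : Decidable (Spec_get_chunking_points numberToChunk chunks isNumOfChunks out) := by unfold Spec_get_chunking_points; infer_instance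

-- ===== CLAIM (what is proved, stated in full; the proofs are below) =====
def Claim_equal_get_chunking_points : Prop := ∀ (numberToChunk : Int) (chunks : Int) (isNumOfChunks : Bool), Dom_get_chunking_points numberToChunk chunks isNumOfChunks → Pre_get_chunking_points numberToChunk chunks isNumOfChunks → Spec_get_chunking_points numberToChunk chunks isNumOfChunks (get_chunking_points numberToChunk chunks isNumOfChunks)

-- ===== LEMMAS AND PROOFS =====

-- running prefix sums started at s (proof-side description of A's accumulator)
def pvAccumulate (s : Int) : List Int → List Int
  | [] => []
  | x :: xs => (s + x) :: pvAccumulate (s + x) xs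

-- A's loop = accumulate-then-takeWhile over the per-index sizes
lemma pvChunkLoopA_eq (n c f k : Int) : ∀ (is acc : List Int) (ong : Int),
    pvChunkLoopA n c f k is acc ong =
      acc ++ (pvAccumulate ong (is.map (fun i => if i < k then c else f))).takeWhile
               (fun p => decide (p < n))
  | [], acc, ong => by simp [pvChunkLoopA, pvAccumulate]
  | i :: rest, acc, ong => by
    by_cases hik : i < k
    · by_cases hpt : n ≤ c + ong
      · simp [pvChunkLoopA, pvAccumulate, hik, hpt,
              show ¬(ong + c < n) by omega]
      · rw [show pvChunkLoopA n c f k (i :: rest) acc ong =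
              pvChunkLoopA n c f k rest (acc ++ [c + ong]) (ong + c) by
            simp [pvChunkLoopA, hik, hpt, add_comm]]
        rw [pvChunkLoopA_eq n c f k rest (acc ++ [c + ong]) (ong + c)]
        simp [pvAccumulate, hik, show ong + c < n by omega,
              add_comm c ong]
    · by_cases hpt : n ≤ f + ong
      · simp [pvChunkLoopA, pvAccumulate, hik, hpt,
              show ¬(ong + f < n) by omega]
      · rw [show pvChunkLoopA n c f k (i :: rest) acc ong =
              pvChunkLoopA n c f k rest (acc ++ [f + ong]) (ong + f) by
            simp [pvChunkLoopA, hik, hpt, add_comm]]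
        rw [pvChunkLoopA_eq n c f k rest (acc ++ [f + ong]) (ong + f)]
        simp [pvAccumulate, hik, show ong + f < n by omega,
              add_comm f ong]

-- accumulating the per-index sizes gives the closed-form boundaries j*q + min(j,k)
lemma pvAccumulate_sizes_eq (q k : Int) (hk : 0 ≤ k) : ∀ (fuel : Nat) (a m s : Int), 0 ≤ a →
    (m - a).toNat ≤ fuel → s = a * q + min a k →
    pvAccumulate s ((PySem.List.pyRange a m 1).map (fun i => if i < k then q + 1 else q)) =
      (PySem.List.pyRange (a + 1) (m + 1) 1).map (fun j => j * q + min j k)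
  | 0, a, m, s, ha, hfuel, hs => by
    rw [PySem.List.pyRange_one_eq_nil (by omega : m ≤ a),
        PySem.List.pyRange_one_eq_nil (by omega : m + 1 ≤ a + 1)]
    simp [pvAccumulate]
  | fuel + 1, a, m, s, ha, hfuel, hs => by
    by_cases ham : a < m
    · rw [PySem.List.pyRange_one_cons ham,
          PySem.List.pyRange_one_cons (by omega : a + 1 < m + 1)]
      simp only [List.map_cons, pvAccumulate]
      have hstep : s + (if a < k then q + 1 else q) = (a + 1) * q + min (a + 1) k := by
        by_cases hak : a < k
        · rw [if_pos hak, hs, min_eq_left (by omega : a ≤ k),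
              min_eq_left (by omega : a + 1 ≤ k)]; ring
        · rw [if_neg hak, hs, min_eq_right (by omega : k ≤ a),
              min_eq_right (by omega : k ≤ a + 1)]; ring
      rw [hstep]
      rw [pvAccumulate_sizes_eq q k hk fuel (a + 1) m _ (by omega) (by omega) rfl]
    · rw [PySem.List.pyRange_one_eq_nil (by omega : m ≤ a),
          PySem.List.pyRange_one_eq_nil (by omega : m + 1 ≤ a + 1)]
      simp [pvAccumulate]

-- on a ≤-sorted list, takeWhile (< n) = filter (< n)
lemma pvTakeWhile_eq_filter (n : Int) : ∀ (l : List Int), l.Pairwise (· ≤ ·) →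
    l.takeWhile (fun p => decide (p < n)) = l.filter (fun p => decide (p < n))
  | [], _ => rfl
  | x :: t, h => by
    obtain ⟨hx, ht⟩ := List.pairwise_cons.mp h
    by_cases hxn : x < n
    · simp [List.takeWhile, List.filter, hxn, pvTakeWhile_eq_filter n t ht]
    · have hall : List.filter (fun p => decide (p < n)) t = [] :=
        List.filter_eq_nil_iff.mpr (fun y hy => by
          have := hx y hy; simp only [decide_eq_true_eq]; omega)
      simp [hxn, hall]

-- filter-then-map of the boundary formula = map-then-filter
lemma pvFilterMapComm (n q k : Int) : ∀ (l : List Int),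
    ((l.filter (fun j => decide (j * q + min j k < n))).map (fun j => j * q + min j k)) =
      (l.map (fun j => j * q + min j k)).filter (fun p => decide (p < n))
  | [] => rfl
  | x :: t => by
    by_cases hx : x * q + min x k < n
    · simp [List.filter, hx, pvFilterMapComm n q k t]
    · simp [List.filter, hx, pvFilterMapComm n q k t]

-- ===== VERDICT (by name: the statement is the Claim_ definition above) =====
theorem get_chunking_points_spec : Claim_equal_get_chunking_points := by
  intro n chunks isNum _hDom hPre
  obtain ⟨hle, hm⟩ := hPre
  unfold Spec_get_chunking_points get_chunking_points get_chunking_points_alt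
  dsimp only
  set m := if isNum then chunks else -(PySem.Int.floordiv (-n) chunks) with hmdef
  set q := PySem.Int.floordiv n m with hqdef
  set k := PySem.Int.mod n m with hkdef
  rcases lt_trichotomy m 0 with hneg | hz | hpos
  · -- m < 0: both ranges are empty
    rw [PySem.List.pyRange_one_eq_nil (by omega : m ≤ 0),
        PySem.List.pyRange_one_eq_nil (by omega : m + 1 ≤ 1)]
    simp [pvChunkLoopA]
  · exact absurd hz hm
  · -- m > 0
    by_cases hm1 : m = 1
    · -- one chunk: the single boundary is n itself, dropped by both sides
      have hk1 : k = 0 := by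
        rw [hkdef, hm1, PySem.Int.mod_eq_emod_of_pos (by norm_num)]; simp
      have hq : q = n := by
        rw [hqdef, hm1, PySem.Int.floordiv_eq_ediv_of_pos (by norm_num)]; simp
      rw [hm1, hk1, hq]
      rw [PySem.List.pyRange_one_cons (by norm_num : (0:Int) < 1),
          PySem.List.pyRange_one_eq_nil (by norm_num : (1:Int) ≤ 0 + 1),
          PySem.List.pyRange_one_cons (by norm_num : (1:Int) < 1 + 1),
          PySem.List.pyRange_one_eq_nil (by norm_num : (1:Int) + 1 ≤ 1 + 1)]
      simp [pvChunkLoopA]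
    · -- m ≥ 2: n ≥ 0, so the boundaries are ≤-sorted and takeWhile = filter
      have hm2 : 2 ≤ m := by omega
      have hn0 : 0 ≤ n := by
        by_contra hneg'
        have hc0 : chunks < 0 := by omega
        by_cases hb : isNum
        · rw [hmdef, if_pos hb] at hm2; omega
        · rw [hmdef, if_neg hb] at hm2
          have hdm := PySem.Int.floordiv_mul_add_mod (-n) chunks
          obtain ⟨hr1, hr2⟩ := PySem.Int.mod_neg_bounds (-n) hc0
          have hQ2 : PySem.Int.floordiv (-n) chunks ≤ -2 := by omega
          have hprod : 0 ≤ -(PySem.Int.floordiv (-n) chunks + 2) * -chunks :=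
            mul_nonneg (by omega) (by omega)
          nlinarith
      have hq0 : 0 ≤ q := by
        rw [hqdef, PySem.Int.le_floordiv_iff_mul_le hpos]; omega
      have hk0 : 0 ≤ k := hkdef ▸ PySem.Int.mod_nonneg n hpos
      have hkm : k < m := hkdef ▸ PySem.Int.mod_lt n hpos
      have hdm : q * m + k = n := PySem.Int.floordiv_mul_add_mod n m
      have hceil : ∀ i ∈ PySem.List.pyRange 0 m 1,
          (if i < k then -(PySem.Int.floordiv (-n) m) else q) = (if i < k then q + 1 else q) := by
        intro i hi
        rw [PySem.List.mem_pyRange_one] at hi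
        by_cases hik : i < k
        · simp only [if_pos hik]
          rw [PySem.Int.neg_floordiv_neg_eq_iff_of_pos hpos]
          constructor <;> nlinarith
        · simp [hik]
      have hsorted : ((PySem.List.pyRange 1 (m + 1) 1).map
          (fun j => j * q + min j k)).Pairwise (· ≤ ·) := by
        refine List.Pairwise.map _ (fun a b hab => ?_)
          (PySem.List.pairwise_lt_pyRange_one (a := 1) (b := m + 1))
        have h1 : min a k ≤ min b k := min_le_min (le_of_lt hab) le_rfl
        have h2 : 0 ≤ (b - a) * q := mul_nonneg (by omega) hq0
        have h3 : b * q = a * q + (b - a) * q := by ring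
        linarith
      rw [pvChunkLoopA_eq, List.map_congr_left hceil,
          pvAccumulate_sizes_eq q k hk0 m.toNat 0 m 0 le_rfl (by omega)
            (by simp [min_eq_left hk0])]
      simp only [zero_add]
      rw [pvTakeWhile_eq_filter _ _ hsorted, pvFilterMapComm]
      simp
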